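-- pv_equiv track=rewrite | github.com/Finnem/XBPy | module/xbpy/orcautil/led_extract.py | determine_fragment_groups
-- ===== SOURCE A (Python) =====
-- from typing import Dict, List, Tuple, Optional, Union
--
-- def determine_fragment_groups(
--     atom_to_fragment: List[int],
--     ligand_atom_indices: Optional[List[int]] = None,
--     assign_mixed: str = 'error'
-- ) -> Tuple[List[int], List[int]]:
--     """
--     Determine which fragments belong to ligand vs receptor based on atom assignments.
--
--     Properly handles fragments that may contain atoms from both ligand and receptor.
--
--     Args:
--         atom_to_fragment: List mapping atom indices to fragment indices (0-based)
--         ligand_atom_indices: List of atom indices that belong to ligand.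
--                             If None, assumes first N/2 atoms are ligand.
--         assign_mixed: How to handle fragments with atoms from both ligand and receptor:
--                      - 'error': Raise ValueError (default, safest)
--                      - 'majority': Assign to whichever has more atoms
--                      - 'ligand': Assign mixed fragments to ligand
--                      - 'receptor': Assign mixed fragments to receptor
--
--     Returns:
--         Tuple of (ligand_fragments, receptor_fragments) where each is a sorted list
--         of fragment indices in 1-based indexing (for LED matrix lookup)
--
--     Raises:
--         ValueError: If a fragment contains atoms from both ligand and receptor
--                    and assign_mixed='error'
--
--     Example:
--         >>> atom_frags = [0, 0, 0, 1, 1, 1, 2, 2]  # 8 atoms in 3 fragments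
--         >>> ligand_atoms = [0, 1, 2, 3, 4, 5]      # First 6 atoms are ligand
--         >>> lig_frags, rec_frags = determine_fragment_groups(atom_frags, ligand_atoms)
--         >>> # lig_frags = [1, 2]  # Fragments 0,1 in 1-based = [1, 2]
--         >>> # rec_frags = [3]     # Fragment 2 in 1-based = [3]
--     """
--     if ligand_atom_indices is None:
--         # Default: assume first half of atoms are ligand
--         ligand_atom_indices = list(range(len(atom_to_fragment) // 2))
--
--     ligand_atom_set = set(ligand_atom_indices)
--     receptor_atom_set = set(range(len(atom_to_fragment))) - ligand_atom_set
--
--     # Group atoms by fragment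
--     fragment_atoms = {}
--     for atom_idx, frag_idx in enumerate(atom_to_fragment):
--         if frag_idx not in fragment_atoms:
--             fragment_atoms[frag_idx] = []
--         fragment_atoms[frag_idx].append(atom_idx)
--
--     ligand_fragments = []
--     receptor_fragments = []
--
--     # Determine assignment for each fragment
--     for frag_idx, atoms_in_frag in sorted(fragment_atoms.items()):
--         atoms_in_frag_set = set(atoms_in_frag)
--         ligand_atoms_in_frag = atoms_in_frag_set & ligand_atom_set
--         receptor_atoms_in_frag = atoms_in_frag_set & receptor_atom_set
--
--         has_ligand = len(ligand_atoms_in_frag) > 0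
--         has_receptor = len(receptor_atoms_in_frag) > 0
--
--         # Convert to 1-based indexing for LED matrix
--         frag_1based = frag_idx + 1
--
--         if has_ligand and has_receptor:
--             # Fragment contains atoms from both molecules
--             if assign_mixed == 'error':
--                 raise ValueError(
--                     f"Fragment {frag_1based} (0-based: {frag_idx}) contains atoms from both ligand and receptor!\n"
--                     f"  Ligand atoms in fragment: {sorted(ligand_atoms_in_frag)}\n"
--                     f"  Receptor atoms in fragment: {sorted(receptor_atoms_in_frag)}\n"
--                     f"  This indicates the fragment definition spans both molecules.\n"
--                     f"  You may need to use finer fragment definitions in ORCA input,\n"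
--                     f"  or set assign_mixed='majority'/'ligand'/'receptor' to force assignment."
--                 )
--             elif assign_mixed == 'majority':
--                 if len(ligand_atoms_in_frag) >= len(receptor_atoms_in_frag):
--                     ligand_fragments.append(frag_1based)
--                 else:
--                     receptor_fragments.append(frag_1based)
--             elif assign_mixed == 'ligand':
--                 ligand_fragments.append(frag_1based)
--             elif assign_mixed == 'receptor':
--                 receptor_fragments.append(frag_1based)
--             else:
--                 raise ValueError(f"Invalid assign_mixed value: {assign_mixed}")
--         elif has_ligand:
--             ligand_fragments.append(frag_1based)
--         elif has_receptor:
--             receptor_fragments.append(frag_1based)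
--
--     return sorted(ligand_fragments), sorted(receptor_fragments)
-- ===== SOURCE B (Python) =====
-- from typing import List, Tuple, Optional
--
--
-- def determine_fragment_groups(
--     atom_to_fragment: List[int],
--     ligand_atom_indices: Optional[List[int]] = None,
--     assign_mixed: str = 'error'
-- ) -> Tuple[List[int], List[int]]:
--     """Classify fragments as ligand/receptor by counting member atoms directly.
--
--     No per-fragment atom lists and no set algebra: for each distinct fragment
--     (in sorted order) count its ligand and receptor atoms in one comprehension.
--     """
--     n = len(atom_to_fragment)
--     if ligand_atom_indices is None:
--         ligand_atom_indices = range(n // 2)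
--     ligand = set(ligand_atom_indices)
--
--     ligand_fragments: List[int] = []
--     receptor_fragments: List[int] = []
--     for frag in sorted(set(atom_to_fragment)):
--         lig = sum(1 for i, f in enumerate(atom_to_fragment) if f == frag and i in ligand)
--         rec = sum(1 for i, f in enumerate(atom_to_fragment) if f == frag and i not in ligand)
--         if lig and rec:
--             if assign_mixed == 'majority':
--                 (ligand_fragments if lig >= rec else receptor_fragments).append(frag + 1)
--             elif assign_mixed == 'ligand':
--                 ligand_fragments.append(frag + 1)
--             elif assign_mixed == 'receptor':
--                 receptor_fragments.append(frag + 1)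
--             elif assign_mixed == 'error':
--                 raise ValueError(
--                     f"Fragment {frag + 1} (0-based: {frag}) contains atoms from both ligand and receptor!\n"
--                     f"  Ligand atoms in fragment: {[i for i, f in enumerate(atom_to_fragment) if f == frag and i in ligand]}\n"
--                     f"  Receptor atoms in fragment: {[i for i, f in enumerate(atom_to_fragment) if f == frag and i not in ligand]}\n"
--                     f"  This indicates the fragment definition spans both molecules.\n"
--                     f"  You may need to use finer fragment definitions in ORCA input,\n"
--                     f"  or set assign_mixed='majority'/'ligand'/'receptor' to force assignment."
--                 )
--             else:
--                 raise ValueError(f"Invalid assign_mixed value: {assign_mixed}")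
--         elif lig:
--             ligand_fragments.append(frag + 1)
--         else:
--             receptor_fragments.append(frag + 1)
--     return sorted(ligand_fragments), sorted(receptor_fragments)
-- ===== Notes on version B (the rewrite author's own statement) =====
-- stated objective: simpler
-- what changed: B drops A's dict-of-atom-lists grouping, receptor index set and per-fragment set intersections: it iterates sorted(set(atom_to_fragment)) and, for each fragment, directly counts its ligand and receptor atoms in one comprehension over enumerate, trading A's O(n + F log F) for O(n*F) on F distinct fragments.
import Mathlib
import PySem

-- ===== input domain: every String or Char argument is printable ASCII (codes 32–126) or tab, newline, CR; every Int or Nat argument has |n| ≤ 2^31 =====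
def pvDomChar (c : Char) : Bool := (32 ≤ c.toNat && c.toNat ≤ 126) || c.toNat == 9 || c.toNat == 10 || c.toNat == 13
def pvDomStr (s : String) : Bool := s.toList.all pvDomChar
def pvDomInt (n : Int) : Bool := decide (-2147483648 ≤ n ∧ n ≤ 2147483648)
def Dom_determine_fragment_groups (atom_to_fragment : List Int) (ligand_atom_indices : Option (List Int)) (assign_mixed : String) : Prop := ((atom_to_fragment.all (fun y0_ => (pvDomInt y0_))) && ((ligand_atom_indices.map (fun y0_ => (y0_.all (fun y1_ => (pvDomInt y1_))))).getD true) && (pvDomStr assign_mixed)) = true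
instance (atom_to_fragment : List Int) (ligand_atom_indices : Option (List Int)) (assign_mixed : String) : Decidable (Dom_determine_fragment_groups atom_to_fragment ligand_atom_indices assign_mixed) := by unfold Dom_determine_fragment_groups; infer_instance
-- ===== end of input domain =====

-- B (simpler): replaces A's dict-of-atom-lists grouping plus set-intersection passes by direct
-- per-fragment counting over enumerate, iterating the sorted distinct fragment indices.

-- ===== PORT A =====
def determine_fragment_groups (atom_to_fragment : List Int) (ligand_atom_indices : Option (List Int)) (assign_mixed : String) : List Int × List Int :=
  -- if ligand_atom_indices is None: ligand_atom_indices = list(range(len(atom_to_fragment) // 2))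
  let lai : List Int := match ligand_atom_indices with
    | none => PySem.List.pyRange 0 (PySem.Int.floordiv (PySem.List.len atom_to_fragment) 2) 1
    | some l => l
  let ligandAtomSet : PySem.Set Int := PySem.Set.ofList lai
  let receptorAtomSet : PySem.Set Int :=
    PySem.Set.diff (PySem.Set.ofList (PySem.List.pyRange 0 (PySem.List.len atom_to_fragment) 1)) ligandAtomSet
  -- the grouping loop: if frag not in d: d[frag] = []; d[frag].append(atom) ≡ d[frag] = d.get(frag, []) + [atom]
  let fragmentAtoms : PySem.Dict Int (List Int) :=
    (PySem.List.enumerate atom_to_fragment 0).foldl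
      (fun d p => d.modify p.2 [] (fun a => a ++ [p.1])) PySem.Dict.empty
  -- sorted(fragment_atoms.items()): dict keys are distinct, so Python's tuple comparison
  -- only ever reaches the first components — exact as a sort keyed on the fragment index
  let res : Option (List Int × List Int) :=
    (PySem.List.sorted fragmentAtoms.items (fun p => p.1)).foldl
      (fun st p =>
        match st with
        | none => none  -- a raise aborted the loop
        | some (lig, rec) =>
          let atomsInFragSet : PySem.Set Int := PySem.Set.ofList p.2
          let ligandIn := PySem.Set.inter atomsInFragSet ligandAtomSet
          let receptorIn := PySem.Set.inter atomsInFragSet receptorAtomSet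
          if 0 < PySem.Set.len ligandIn ∧ 0 < PySem.Set.len receptorIn then
            if assign_mixed = "error" then none  -- raise ValueError: excluded by Pre_
            else if assign_mixed = "majority" then
              if PySem.Set.len receptorIn ≤ PySem.Set.len ligandIn then some (lig ++ [p.1 + 1], rec)
              else some (lig, rec ++ [p.1 + 1])
            else if assign_mixed = "ligand" then some (lig ++ [p.1 + 1], rec)
            else if assign_mixed = "receptor" then some (lig, rec ++ [p.1 + 1])
            else none  -- raise ValueError (invalid assign_mixed): excluded by Pre_
          else if 0 < PySem.Set.len ligandIn then some (lig ++ [p.1 + 1], rec)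
          else if 0 < PySem.Set.len receptorIn then some (lig, rec ++ [p.1 + 1])
          else some (lig, rec))
      (some ([], []))
  match res with
  | some (lig, rec) => (PySem.List.sorted lig (fun x => x), PySem.List.sorted rec (fun x => x))
  | none => ([], [])  -- ValueError was raised: these inputs are excluded by Pre_

-- ===== PORT B =====
def determine_fragment_groups_alt (atom_to_fragment : List Int) (ligand_atom_indices : Option (List Int)) (assign_mixed : String) : List Int × List Int :=
  let ligand : PySem.Set Int := PySem.Set.ofList (match ligand_atom_indices with
    | none => PySem.List.pyRange 0 (PySem.Int.floordiv (PySem.List.len atom_to_fragment) 2) 1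
    | some l => l)
  let res : Option (List Int × List Int) :=
    (PySem.List.sorted (PySem.Set.ofList atom_to_fragment) (fun x => x)).foldl
      (fun st frag =>
        match st with
        | none => none  -- a raise aborted the loop
        | some (ligF, recF) =>
          -- lig = sum(1 for i, f in enumerate(...) if f == frag and i in ligand), rec likewise
          let lig : Int := ((PySem.List.enumerate atom_to_fragment 0).map
            (fun p => if p.2 == frag && PySem.Set.contains ligand p.1 then (1 : Int) else 0)).sum
          let rec_ : Int := ((PySem.List.enumerate atom_to_fragment 0).map
            (fun p => if p.2 == frag && !PySem.Set.contains ligand p.1 then (1 : Int) else 0)).sum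
          if lig ≠ 0 ∧ rec_ ≠ 0 then
            if assign_mixed = "majority" then
              if rec_ ≤ lig then some (ligF ++ [frag + 1], recF) else some (ligF, recF ++ [frag + 1])
            else if assign_mixed = "ligand" then some (ligF ++ [frag + 1], recF)
            else if assign_mixed = "receptor" then some (ligF, recF ++ [frag + 1])
            else none  -- raise ValueError ('error' or invalid): excluded by Pre_
          else if lig ≠ 0 then some (ligF ++ [frag + 1], recF)
          else some (ligF, recF ++ [frag + 1]))
      (some ([], []))
  match res with
  | some (ligF, recF) => (PySem.List.sorted ligF (fun x => x), PySem.List.sorted recF (fun x => x))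
  | none => ([], [])  -- ValueError was raised: these inputs are excluded by Pre_

-- ===== PRECONDITION & SPEC =====
-- Pre_ excludes exactly the inputs on which A raises ValueError: some fragment contains both
-- ligand and receptor atoms while assign_mixed is none of 'majority'/'ligand'/'receptor'
-- (B raises there too).
def Pre_determine_fragment_groups (atom_to_fragment : List Int) (ligand_atom_indices : Option (List Int)) (assign_mixed : String) : Prop :=
  (assign_mixed = "majority" ∨ assign_mixed = "ligand" ∨ assign_mixed = "receptor") ∨
  ∀ p ∈ PySem.List.enumerate atom_to_fragment 0, ∀ q ∈ PySem.List.enumerate atom_to_fragment 0,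
    p.2 = q.2 →
      PySem.Set.contains (PySem.Set.ofList (match ligand_atom_indices with
        | none => PySem.List.pyRange 0 (PySem.Int.floordiv (PySem.List.len atom_to_fragment) 2) 1
        | some l => l)) p.1
      = PySem.Set.contains (PySem.Set.ofList (match ligand_atom_indices with
        | none => PySem.List.pyRange 0 (PySem.Int.floordiv (PySem.List.len atom_to_fragment) 2) 1
        | some l => l)) q.1
instance (atom_to_fragment : List Int) (ligand_atom_indices : Option (List Int)) (assign_mixed : String) : Decidable (Pre_determine_fragment_groups atom_to_fragment ligand_atom_indices assign_mixed) := by unfold Pre_determine_fragment_groups; infer_instance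

def pvWitness_determine_fragment_groups : List Int × Option (List Int) × String :=
  ([0, 0, 0, 1, 1, 1, 2, 2], some [0, 1, 2, 3, 4, 5], "error")

def Spec_determine_fragment_groups (atom_to_fragment : List Int) (ligand_atom_indices : Option (List Int)) (assign_mixed : String) (out : List Int × List Int) : Prop := out = determine_fragment_groups_alt atom_to_fragment ligand_atom_indices assign_mixed
instance (atom_to_fragment : List Int) (ligand_atom_indices : Option (List Int)) (assign_mixed : String) (out : List Int × List Int) : Decidable (Spec_determine_fragment_groups atom_to_fragment ligand_atom_indices assign_mixed out) := by unfold Spec_determine_fragment_groups; infer_instance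

-- ===== CLAIM (what is proved, stated in full; the proofs are below) =====
def Claim_equal_determine_fragment_groups : Prop := ∀ (atom_to_fragment : List Int) (ligand_atom_indices : Option (List Int)) (assign_mixed : String), Dom_determine_fragment_groups atom_to_fragment ligand_atom_indices assign_mixed → Pre_determine_fragment_groups atom_to_fragment ligand_atom_indices assign_mixed → Spec_determine_fragment_groups atom_to_fragment ligand_atom_indices assign_mixed (determine_fragment_groups atom_to_fragment ligand_atom_indices assign_mixed)

-- ===== LEMMAS AND PROOFS =====

-- the atoms of fragment f, in atom order (A's fragment_atoms[f])
def pvAtomsOf (atf : List Int) (f : Int) : List Int :=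
  ((PySem.List.enumerate atf 0).filter (fun p => p.2 == f)).map (fun p => p.1)

theorem pvUpdate_eq_append (xs : List Int) : ∀ s : List Int, (s ++ xs).Nodup →
    List.foldl PySem.Set.add s xs = s ++ xs := by
  induction xs with
  | nil => intro s _; rw [List.foldl_nil, List.append_nil]
  | cons x xs ih =>
    intro s h
    have hx : x ∉ s := fun hm => (List.disjoint_of_nodup_append h) hm (by simp)
    have hadd : PySem.Set.add s x = s ++ [x] := by
      simp [PySem.Set.add, PySem.Set.contains, List.contains_eq_mem, hx]
    rw [List.foldl_cons, hadd]
    exact (ih (s ++ [x]) (by rwa [List.append_cons] at h)).trans (List.append_cons s x xs).symm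

theorem pvOfList_nodup (xs : List Int) (h : xs.Nodup) : PySem.Set.ofList xs = xs := by
  simpa using pvUpdate_eq_append xs [] (by simpa using h)

theorem pvAtomsOf_nodup (atf : List Int) (f : Int) : (pvAtomsOf atf f).Nodup := by
  unfold pvAtomsOf
  have h1 := (PySem.List.pairwise_lt_enumerate atf 0).filter (fun p => p.2 == f)
  have h2 : (((PySem.List.enumerate atf 0).filter (fun p => p.2 == f)).map (fun p => p.1)).Pairwise (· < ·) :=
    List.pairwise_map.mpr h1
  exact h2.imp (fun h => ne_of_lt h)

theorem pvFragDict_getD (atf : List Int) (f : Int) :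
    ((PySem.List.enumerate atf 0).foldl
      (fun d p => d.modify p.2 [] (fun a => a ++ [p.1])) (PySem.Dict.empty : PySem.Dict Int (List Int))).getD f []
    = pvAtomsOf atf f := by
  have hm : (PySem.List.enumerate atf 0).foldl
      (fun d p => d.modify p.2 [] (fun a => a ++ [p.1])) (PySem.Dict.empty : PySem.Dict Int (List Int))
      = ((PySem.List.enumerate atf 0).map (fun p => (p.2, p.1))).foldl
        (fun d q => d.modify q.1 [] (fun a => a ++ [q.2])) PySem.Dict.empty := by
    rw [List.foldl_map]
  rw [hm, PySem.Dict.getD_foldl_modify_append]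
  simp [pvAtomsOf, List.filter_map, Function.comp_def, List.map_map, PySem.Dict.getD_empty]

theorem pvFragDict_keys (atf : List Int) :
    ((PySem.List.enumerate atf 0).foldl
      (fun d p => d.modify p.2 [] (fun a => a ++ [p.1])) (PySem.Dict.empty : PySem.Dict Int (List Int))).keys
    = PySem.Set.ofList atf := by
  have h := PySem.Dict.keys_foldl_modify_key (PySem.List.enumerate atf 0) (fun p => p.2)
    ([] : List Int) (fun _ p => (fun a => a ++ [p.1])) (PySem.Dict.empty : PySem.Dict Int (List Int))
  simp only [PySem.Dict.keys_empty] at h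
  have h2 : (PySem.List.enumerate atf 0).foldl
      (fun d p => d.modify p.2 [] (fun a => a ++ [p.1])) (PySem.Dict.empty : PySem.Dict Int (List Int))
      = (PySem.List.enumerate atf 0).foldl
        (fun d x => d.modify x.2 [] ((fun _ p => (fun a => a ++ [p.1])) d x)) PySem.Dict.empty := rfl
  rw [h2, h, PySem.List.map_snd_enumerate]
  rfl

theorem pvFragDict_nodup_keys (atf : List Int) :
    ((PySem.List.enumerate atf 0).foldl
      (fun d p => d.modify p.2 [] (fun a => a ++ [p.1])) (PySem.Dict.empty : PySem.Dict Int (List Int))).keys.Nodup := by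
  have h := PySem.Dict.nodup_keys_foldl_modify_key (PySem.List.enumerate atf 0) (fun p => p.2)
    ([] : List Int) (fun _ p => (fun a => a ++ [p.1])) (PySem.Dict.empty : PySem.Dict Int (List Int))
    PySem.Dict.nodup_keys_empty
  exact h

theorem pvSortedItems (atf : List Int) :
    PySem.List.sorted ((PySem.List.enumerate atf 0).foldl
      (fun d p => d.modify p.2 [] (fun a => a ++ [p.1])) (PySem.Dict.empty : PySem.Dict Int (List Int))).items
      (fun p => p.1)
    = (PySem.List.sorted (PySem.Set.ofList atf) (fun x => x)).map (fun f => (f, pvAtomsOf atf f)) := by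
  apply PySem.List.sorted_eq_of_perm_of_pairwise_lt
  · have hitems := PySem.Dict.items_eq_map_keys _ (pvFragDict_nodup_keys atf) ([] : List Int)
    rw [hitems, pvFragDict_keys]
    simp only [pvFragDict_getD]
    exact (PySem.List.sorted_perm (PySem.Set.ofList atf) (fun x => x) false).map _
  · have := PySem.List.sorted_ofList_pairwise_lt atf
    exact List.pairwise_map.mpr (by simpa using this)

theorem pvLigLen (atf : List Int) (L : PySem.Set Int) (f : Int) :
    PySem.Set.len (PySem.Set.inter (PySem.Set.ofList (pvAtomsOf atf f)) L)
    = ((PySem.List.enumerate atf 0).map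
        (fun p => if p.2 == f && PySem.Set.contains L p.1 then (1 : Int) else 0)).sum := by
  rw [PySem.List.sum_map_ite_one_zero, pvOfList_nodup _ (pvAtomsOf_nodup atf f)]
  have hlen : (PySem.Set.inter (pvAtomsOf atf f) L).length
      = List.countP (fun p => p.2 == f && PySem.Set.contains L p.1) (PySem.List.enumerate atf 0) := by
    unfold PySem.Set.inter pvAtomsOf
    rw [← List.countP_eq_length_filter, List.countP_map, List.countP_filter]
    exact List.countP_congr (fun x _ => by simp [Function.comp, Bool.and_comm])
  unfold PySem.Set.len
  exact_mod_cast hlen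

theorem pvRecLen (atf : List Int) (L : PySem.Set Int) (f : Int) :
    PySem.Set.len (PySem.Set.inter (PySem.Set.ofList (pvAtomsOf atf f))
      (PySem.Set.diff (PySem.Set.ofList (PySem.List.pyRange 0 (PySem.List.len atf) 1)) L))
    = ((PySem.List.enumerate atf 0).map
        (fun p => if p.2 == f && !PySem.Set.contains L p.1 then (1 : Int) else 0)).sum := by
  rw [PySem.List.sum_map_ite_one_zero, pvOfList_nodup _ (pvAtomsOf_nodup atf f)]
  have hR : ∀ p ∈ PySem.List.enumerate atf 0,
      PySem.Set.contains (PySem.Set.diff (PySem.Set.ofList (PySem.List.pyRange 0 (PySem.List.len atf) 1)) L) p.1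
      = !PySem.Set.contains L p.1 := by
    intro p hp
    obtain ⟨k, hk, rfl⟩ := (PySem.List.mem_enumerate_iff atf 0 p).mp hp
    simp only [zero_add]
    by_cases hL : ((k : Int)) ∈ L
    · simp [PySem.Set.diff, PySem.Set.contains, List.contains_eq_mem, hL, hk]
    · simp [PySem.Set.diff, PySem.Set.contains, List.contains_eq_mem, hL,
        PySem.Set.mem_ofList, hk]
  have hlen : (PySem.Set.inter (pvAtomsOf atf f)
        (PySem.Set.diff (PySem.Set.ofList (PySem.List.pyRange 0 (PySem.List.len atf) 1)) L)).length
      = List.countP (fun p => p.2 == f && !PySem.Set.contains L p.1) (PySem.List.enumerate atf 0) := by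
    unfold PySem.Set.inter pvAtomsOf
    rw [← List.countP_eq_length_filter, List.countP_map, List.countP_filter]
    refine List.countP_congr (fun x hx => ?_)
    simp only [Function.comp]
    rw [hR x hx]
    simp [Bool.and_comm]
  unfold PySem.Set.len
  exact_mod_cast hlen

theorem pvCounts_not_both_zero (atf : List Int) (L : PySem.Set Int) (f : Int) (hf : f ∈ atf) :
    ¬ (((PySem.List.enumerate atf 0).map
          (fun p => if p.2 == f && PySem.Set.contains L p.1 then (1 : Int) else 0)).sum = 0
       ∧ ((PySem.List.enumerate atf 0).map
          (fun p => if p.2 == f && !PySem.Set.contains L p.1 then (1 : Int) else 0)).sum = 0) := by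
  rw [PySem.List.sum_map_ite_one_zero, PySem.List.sum_map_ite_one_zero]
  rintro ⟨h1, h2⟩
  rw [Nat.cast_eq_zero, List.countP_eq_zero] at h1 h2
  obtain ⟨k, hk, hkf⟩ := List.mem_iff_getElem.mp hf
  have hp : ((0 : Int) + (k : Int), atf[k]) ∈ PySem.List.enumerate atf 0 :=
    (PySem.List.mem_enumerate_iff atf 0 _).mpr ⟨k, hk, rfl⟩
  have hb : (atf[k] == f) = true := by simpa using hkf
  by_cases hL : ((k : Int)) ∈ L
  · exact h1 _ hp (by simp [hb, PySem.Set.contains, List.contains_eq_mem, hL])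
  · exact h2 _ hp (by simp [hb, PySem.Set.contains, List.contains_eq_mem, hL])

-- the per-fragment loop bodies of the two ports agree (L is the ligand atom set)
theorem pvBody (atf : List Int) (L : PySem.Set Int) (am : String) (x : Int) (hf : x ∈ atf)
    (st : Option (List Int × List Int)) :
    (match st with
      | none => none
      | some (lig, rec) =>
        let atomsInFragSet : PySem.Set Int := PySem.Set.ofList (pvAtomsOf atf x)
        let ligandIn := PySem.Set.inter atomsInFragSet L
        let receptorIn := PySem.Set.inter atomsInFragSet
          (PySem.Set.diff (PySem.Set.ofList (PySem.List.pyRange 0 (PySem.List.len atf) 1)) L)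
        if 0 < PySem.Set.len ligandIn ∧ 0 < PySem.Set.len receptorIn then
          if am = "error" then none
          else if am = "majority" then
            if PySem.Set.len receptorIn ≤ PySem.Set.len ligandIn then some (lig ++ [x + 1], rec)
            else some (lig, rec ++ [x + 1])
          else if am = "ligand" then some (lig ++ [x + 1], rec)
          else if am = "receptor" then some (lig, rec ++ [x + 1])
          else none
        else if 0 < PySem.Set.len ligandIn then some (lig ++ [x + 1], rec)
        else if 0 < PySem.Set.len receptorIn then some (lig, rec ++ [x + 1])
        else some (lig, rec))
    = (match st with
      | none => none
      | some (ligF, recF) =>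
        let lig : Int := ((PySem.List.enumerate atf 0).map
          (fun p => if p.2 == x && PySem.Set.contains L p.1 then (1 : Int) else 0)).sum
        let rec_ : Int := ((PySem.List.enumerate atf 0).map
          (fun p => if p.2 == x && !PySem.Set.contains L p.1 then (1 : Int) else 0)).sum
        if lig ≠ 0 ∧ rec_ ≠ 0 then
          if am = "majority" then
            if rec_ ≤ lig then some (ligF ++ [x + 1], recF) else some (ligF, recF ++ [x + 1])
          else if am = "ligand" then some (ligF ++ [x + 1], recF)
          else if am = "receptor" then some (ligF, recF ++ [x + 1])
          else none
        else if lig ≠ 0 then some (ligF ++ [x + 1], recF)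
        else some (ligF, recF ++ [x + 1])) := by
  cases st with
  | none => rfl
  | some pr =>
    obtain ⟨lig, rec⟩ := pr
    simp only [pvRecLen]
    simp only [pvLigLen]
    simp only [PySem.List.sum_map_ite_one_zero]
    have hnb := pvCounts_not_both_zero atf L x hf
    rw [PySem.List.sum_map_ite_one_zero, PySem.List.sum_map_ite_one_zero] at hnb
    have hcond : ∀ n : ℕ, ((0 : ℤ) < (n : ℤ)) = (((n : ℤ)) ≠ 0) := fun n => propext (by omega)
    simp only [hcond]
    generalize hg1 : (↑(List.countP (fun p => p.2 == x && PySem.Set.contains L p.1)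
      (PySem.List.enumerate atf 0)) : ℤ) = c1 at hnb ⊢
    generalize hg2 : (↑(List.countP (fun p => p.2 == x && !PySem.Set.contains L p.1)
      (PySem.List.enumerate atf 0)) : ℤ) = c2 at hnb ⊢
    split_ifs
    all_goals first
      | rfl
      | (exfalso; omega)
      | (subst_vars; exfalso; simp_all)

theorem pvMain (atf : List Int) (lig? : Option (List Int)) (am : String) :
    determine_fragment_groups atf lig? am = determine_fragment_groups_alt atf lig? am := by
  simp only [determine_fragment_groups, determine_fragment_groups_alt, pvSortedItems,
    List.foldl_map]
  congr 1
  apply PySem.List.foldl_congr_mem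
  intro st x hx
  have hf : x ∈ atf := (PySem.Set.mem_ofList atf x).mp
    ((PySem.List.mem_sorted _ _ _ _).mp hx)
  exact pvBody atf _ am x hf st

-- ===== VERDICT (by name: the statement is the Claim_ definition above) =====
theorem determine_fragment_groups_spec : Claim_equal_determine_fragment_groups := by
  intro atf lig? am _ _
  unfold Spec_determine_fragment_groups
  exact pvMain atf lig? am
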